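-- pv_equiv track=rewrite | github.com/alecnelson22/QA-NLP-System | tune.py | get_best_context
-- ===== SOURCE A (Python) =====
-- def get_context_words(text, k, t_idx, split=False):
--     if split:
--         text = text.split()
--     if k == 0:
--         l_words = text[0:t_idx]
--         r_words = text[t_idx+1:]
--         words = l_words + r_words
--     else:
--         if t_idx-k > 0:
--             start = t_idx - k
--         else:
--             start = 0
--         l_words = text[start:t_idx]
--         if t_idx+k < len(text):
--             end = t_idx+k
--         else:
--             end = len(text)
--         r_words = text[t_idx:end]
--         words = l_words + r_words
--     return words
--
-- def get_best_context(story, question, k):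
--     best_context_matches = 0
--     for t_idx in range(len(story)):
--         context_words = get_context_words(story, k, t_idx)
--         curr_context_matches = 0
--         # for q_word in question.split():
--         for q_word in question:
--             # TODO: if duplicates exist, this still only counts 1
--             # Could add a custom scoring function here
--             if q_word in context_words:
--                 curr_context_matches += 1
--         if curr_context_matches > best_context_matches:
--             best_context_matches = curr_context_matches
--             best_context = context_words
--     return best_context
-- ===== SOURCE B (Python) =====
-- def get_best_context(story, question, k):
--     # Sliding-window re-implementation: O(n + m + k) instead of rescanning every window.
--     n = len(story)
--     qcount = {}
--     for q in question:
--         qcount[q] = qcount.get(q, 0) + 1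
--     best = 0
--     best_lo = 0
--     best_hi = 0
--     found = False
--     if k == 0:
--         scount = {}
--         for w in story:
--             scount[w] = scount.get(w, 0) + 1
--         base = 0
--         for w, c in qcount.items():
--             if w in scount:
--                 base += c
--         for t in range(n):
--             w = story[t]
--             m = base - (qcount.get(w, 0) if scount[w] == 1 else 0)
--             if m > best:
--                 best = m
--                 best_lo = t
--                 found = True
--         if not found:
--             return []
--         t = best_lo
--         return story[:t] + story[t+1:]
--     # k > 0: window for index t is story[max(t-k,0):min(t+k,n)]; slide it, keeping
--     # a multiset of the window and the current match count incrementally.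
--     wcount = {}
--     m = 0
--     lo = 0
--     hi = 0
--     for t in range(n):
--         new_lo = max(t - k, 0)
--         new_hi = min(t + k, n)
--         for i in range(hi, new_hi):
--             w = story[i]
--             c = wcount.get(w, 0)
--             wcount[w] = c + 1
--             if c == 0:
--                 m += qcount.get(w, 0)
--         for i in range(lo, new_lo):
--             w = story[i]
--             c = wcount[w]
--             wcount[w] = c - 1
--             if c == 1:
--                 m -= qcount.get(w, 0)
--         lo = new_lo
--         hi = new_hi
--         if m > best:
--             best = m
--             best_lo = lo
--             best_hi = hi
--             found = True
--     if not found: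
--         return []
--     return story[best_lo:best_hi]
-- ===== Notes on version B (the rewrite author's own statement) =====
-- stated objective: faster
-- what changed: A rebuilds every context window and scans it once per question word; B builds question/story counters once and slides one window over the story, updating a multiset of the window and the match count incrementally, slicing only the best window at the end.
-- outside the precondition, e.g. on get_best_context(['a', 'b', 'c'], ['a'], -1): A returns ['a', 'b'], B raises KeyError
import Mathlib
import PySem

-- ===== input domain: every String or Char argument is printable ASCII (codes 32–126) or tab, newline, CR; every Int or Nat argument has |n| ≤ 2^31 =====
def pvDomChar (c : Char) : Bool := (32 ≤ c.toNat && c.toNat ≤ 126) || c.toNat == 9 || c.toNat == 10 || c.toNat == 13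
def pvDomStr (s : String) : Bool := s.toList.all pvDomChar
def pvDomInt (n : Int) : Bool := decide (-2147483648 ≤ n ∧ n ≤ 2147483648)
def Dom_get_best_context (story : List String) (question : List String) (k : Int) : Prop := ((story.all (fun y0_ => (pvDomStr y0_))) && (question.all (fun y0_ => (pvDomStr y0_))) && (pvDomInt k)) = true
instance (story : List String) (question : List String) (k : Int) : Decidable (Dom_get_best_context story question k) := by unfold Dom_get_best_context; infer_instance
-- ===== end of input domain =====

-- ===== PORT A =====
-- B replaces A's per-window rescans by one sliding window with an incremental match count (return value only; neither mutates its arguments).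
def get_context_words (text : List String) (k : Int) (t_idx : Int) : List String :=
  if k = 0 then
    let l_words := PySem.List.slice text (some 0) (some t_idx)
    let r_words := PySem.List.slice text (some (t_idx + 1)) none
    l_words ++ r_words
  else
    let start := if t_idx - k > 0 then t_idx - k else 0
    let l_words := PySem.List.slice text (some start) (some t_idx)
    let e := if t_idx + k < (text.length : Int) then t_idx + k else (text.length : Int)
    let r_words := PySem.List.slice text (some t_idx) (some e)
    l_words ++ r_words

def get_best_context (story : List String) (question : List String) (k : Int) : List String :=
  let fin := (PySem.List.pyRange 0 (story.length : Int) 1).foldl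
    (fun (s : Int × Option (List String)) t_idx =>
      let context_words := get_context_words story k t_idx
      let curr := question.foldl (fun acc q_word => if q_word ∈ context_words then acc + 1 else acc) (0 : Int)
      if curr > s.1 then (curr, some context_words) else s)
    (0, none)
  fin.2.getD []   -- Python raises UnboundLocalError when no window matched; Pre_ excludes those inputs

-- ===== PORT B =====
structure BState where
  wc : PySem.Dict String Int
  m : Int
  lo : Int
  hi : Int
  best : Int
  best_lo : Int
  best_hi : Int
  found : Bool
deriving Repr

def get_best_context_alt (story : List String) (question : List String) (k : Int) : List String :=
  let n : Int := story.length
  let qcount := question.foldl (fun d q => d.insert q (d.getD q 0 + 1)) (PySem.Dict.empty : PySem.Dict String Int)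
  if k = 0 then
    let scount := story.foldl (fun d w => d.insert w (d.getD w 0 + 1)) (PySem.Dict.empty : PySem.Dict String Int)
    let base := question.foldl (fun b q => if scount.contains q then b + 1 else b) (0 : Int)
    let fin := (PySem.List.pyRange 0 n 1).foldl
      (fun (s : Int × Int × Bool) t =>
        let w := PySem.List.pyGetD story t ""
        let m := base - (if scount.getD w 0 = 1 then qcount.getD w 0 else 0)
        if m > s.1 then (m, t, true) else s)
      (0, 0, false)
    if fin.2.2 then
      PySem.List.slice story none (some fin.2.1) ++ PySem.List.slice story (some (fin.2.1 + 1)) none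
    else []
  else
    let fin := (PySem.List.pyRange 0 n 1).foldl
      (fun (s : BState) t =>
        let new_lo := max (t - k) 0
        let new_hi := min (t + k) n
        let s1 := (PySem.List.pyRange s.hi new_hi 1).foldl
          (fun (p : PySem.Dict String Int × Int) i =>
            let w := PySem.List.pyGetD story i ""
            let c := p.1.getD w 0
            (p.1.insert w (c + 1), if c = 0 then p.2 + qcount.getD w 0 else p.2))
          (s.wc, s.m)
        let s2 := (PySem.List.pyRange s.lo new_lo 1).foldl
          (fun (p : PySem.Dict String Int × Int) i =>
            let w := PySem.List.pyGetD story i ""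
            let c := p.1.getD w 0   -- Source B reads wcount[w]; defined on every admitted input (k > 0 keeps i inside the window)
            (p.1.insert w (c - 1), if c = 1 then p.2 - qcount.getD w 0 else p.2))
          (s1.1, s1.2)
        let s' : BState := { wc := s2.1, m := s2.2, lo := new_lo, hi := new_hi,
                             best := s.best, best_lo := s.best_lo, best_hi := s.best_hi, found := s.found }
        if s'.m > s'.best then { s' with best := s'.m, best_lo := new_lo, best_hi := new_hi, found := true } else s')
      { wc := PySem.Dict.empty, m := 0, lo := 0, hi := 0, best := 0, best_lo := 0, best_hi := 0, found := false }
    if fin.found then PySem.List.slice story (some fin.best_lo) (some fin.best_hi) else []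

-- ===== PRECONDITION & SPEC =====
-- Pre_ restricts to the natural domain k >= 0 (a negative window size is meaningless; A's value there is
-- an artefact of Python's negative-slice wraparound) and excludes the inputs on which A raises
-- UnboundLocalError, namely those where no window contains any question word.
def Pre_get_best_context (story : List String) (question : List String) (k : Int) : Prop :=
  0 ≤ k ∧ (∃ q ∈ question, q ∈ story) ∧ (k = 0 → 2 ≤ story.length)
instance (story : List String) (question : List String) (k : Int) : Decidable (Pre_get_best_context story question k) := by unfold Pre_get_best_context; infer_instance
def pvWitness_get_best_context : List String × List String × Int := (["a", "b"], ["a"], 1)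

def Spec_get_best_context (story : List String) (question : List String) (k : Int) (out : List String) : Prop := out = get_best_context_alt story question k
instance (story : List String) (question : List String) (k : Int) (out : List String) : Decidable (Spec_get_best_context story question k out) := by unfold Spec_get_best_context; infer_instance

-- ===== CLAIM (what is proved, stated in full; the proofs are below) =====
def Claim_equal_get_best_context : Prop := ∀ (story : List String) (question : List String) (k : Int), Dom_get_best_context story question k → Pre_get_best_context story question k → Spec_get_best_context story question k (get_best_context story question k)

-- ===== LEMMAS AND PROOFS =====

def seg (story : List String) (a b : Nat) : List String := (story.drop a).take (b - a)

def mc (question l : List String) : Int := (question.countP (fun q => decide (q ∈ l)) : Int)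

def refStep (cnt : Nat → Int) (s : Int × Option Nat) (t : Nat) : Int × Option Nat :=
  if cnt t > s.1 then (cnt t, some t) else s

def refFold (cnt : Nat → Int) (n : Nat) : Int × Option Nat := (List.range n).foldl (refStep cnt) (0, none)

-- seg basics
lemma seg_succ (story : List String) {a i : Nat} (h1 : a ≤ i) (h2 : i < story.length) :
    seg story a (i + 1) = seg story a i ++ [story.getD i ""] := by
  unfold seg
  have hd : i + 1 - a = (i - a) + 1 := by omega
  rw [hd, List.take_succ]
  congr 1
  have : (story.drop a)[i-a]? = some (story.getD i "") := by
    rw [List.getElem?_drop]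
    have : a + (i - a) = i := by omega
    rw [this]
    rw [List.getElem?_eq_getElem h2, List.getD_eq_getElem _ _ h2]
  simp [this]

lemma seg_cons (story : List String) {a b : Nat} (h1 : a < b) (h2 : a < story.length) :
    seg story a b = story.getD a "" :: seg story (a + 1) b := by
  unfold seg
  rw [List.drop_eq_getElem_cons h2]
  have hd : b - a = (b - (a+1)) + 1 := by omega
  rw [hd, List.take_succ_cons]
  rw [List.getD_eq_getElem _ _ h2]

-- match-count arithmetic
lemma countP_append_singleton (qs l : List String) (x : String) :
    qs.countP (fun q => decide (q ∈ l ++ [x]))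
      = qs.countP (fun q => decide (q ∈ l)) + (if x ∈ l then 0 else qs.count x) := by
  induction qs with
  | nil => simp
  | cons q qs ih =>
    simp only [List.countP_cons, List.count_cons, ih]
    by_cases hq : q = x
    · subst hq
      by_cases hl : q ∈ l <;> simp [hl] <;> omega
    · have hm : (q ∈ l ++ [x]) ↔ q ∈ l := by simp [hq]
      by_cases hl : q ∈ l <;> by_cases hxl : x ∈ l <;>
        simp [hm, hl, hxl, hq] <;> omega

lemma mc_append (question l : List String) (x : String) :
    mc question (l ++ [x]) = mc question l + (if x ∈ l then 0 else (question.count x : Int)) := by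
  unfold mc
  rw [countP_append_singleton]
  split_ifs <;> push_cast <;> ring

lemma mc_cons (question l : List String) (x : String) :
    mc question (x :: l) = mc question l + (if x ∈ l then 0 else (question.count x : Int)) := by
  have h : mc question (x :: l) = mc question (l ++ [x]) := by
    unfold mc
    congr 1
    apply List.countP_congr
    intro q _
    simp [List.mem_append, or_comm]
  rw [h, mc_append]

-- counter-dict lemmas (B builds its counters with d.insert q (d.getD q 0 + 1))
lemma counter_getD (xs : List String) :
    ∀ (d : PySem.Dict String Int) (w : String),
      (xs.foldl (fun d q => d.insert q (d.getD q 0 + 1)) d).getD w 0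
        = d.getD w 0 + xs.count w := by
  induction xs with
  | nil => intro d w; simp
  | cons q qs ih =>
    intro d w
    simp only [List.foldl_cons, ih, PySem.Dict.getD_insert, List.count_cons]
    by_cases h : w = q
    · subst h; simp; ring
    · simp [h, Ne.symm h]

lemma counter_contains (xs : List String) :
    ∀ (d : PySem.Dict String Int) (w : String),
      (xs.foldl (fun d q => d.insert q (d.getD q 0 + 1)) d).contains w
        = (d.contains w || decide (w ∈ xs)) := by
  induction xs with
  | nil => intro d w; simp
  | cons q qs ih =>
    intro d w
    simp only [List.foldl_cons, ih, PySem.Dict.contains_insert, List.mem_cons]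
    by_cases h : w = q
    · simp [h]
    · have hb : (w == q) = false := by simp [h]
      simp [hb, h]

-- the selection fold of A: payload simulation
lemma simA (cnt : Nat → Int) (f : Nat → List String) :
    ∀ (l : List Nat) (b : Int) (oc : Option Nat),
      l.foldl (fun s t => if cnt t > s.1 then (cnt t, some (f t)) else s) (b, oc.map f)
        = ((l.foldl (refStep cnt) (b, oc)).1, (l.foldl (refStep cnt) (b, oc)).2.map f) := by
  intro l
  induction l with
  | nil => intro b oc; rfl
  | cons t ts ih =>
    intro b oc
    simp only [List.foldl_cons, refStep]
    by_cases h : cnt t > b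
    · simpa [h] using ih (cnt t) (some t)
    · simpa [h] using ih b oc

-- the selection fold of B (k = 0 branch): best index as Int, found flag
def selRel (g : Nat → Int) (s : Int × Int × Bool) (r : Int × Option Nat) : Prop :=
  s.1 = r.1 ∧ (match r.2 with
               | none => s.2.2 = false
               | some t => s.2.2 = true ∧ s.2.1 = g t)

lemma simB0 (cnt : Nat → Int) (g : Nat → Int) :
    ∀ (l : List Nat) (s : Int × Int × Bool) (r : Int × Option Nat), selRel g s r →
      selRel g (l.foldl (fun s t => if cnt t > s.1 then (cnt t, g t, true) else s) s)
               (l.foldl (refStep cnt) r) := by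
  intro l
  induction l with
  | nil => intro s r h; exact h
  | cons t ts ih =>
    intro s r h
    simp only [List.foldl_cons, refStep]
    rw [← h.1]
    by_cases hc : cnt t > s.1
    · simp only [hc, if_true]
      exact ih _ _ ⟨rfl, by simp⟩
    · simp only [hc, if_false]
      exact ih _ _ h


lemma seg_glue (story : List String) {a b c : Nat} (h1 : a ≤ b) (h2 : b ≤ c) :
    seg story a b ++ seg story b c = seg story a c := by
  unfold seg
  have h3 : c - a = (b - a) + (c - b) := by omega
  rw [h3, List.take_add]
  congr 2
  rw [List.drop_drop]
  congr 1
  omega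

lemma refFold_congr {c1 c2 : Nat → Int} {n : Nat} (h : ∀ t < n, c1 t = c2 t) :
    refFold c1 n = refFold c2 n := by
  unfold refFold
  apply PySem.List.foldl_congr_mem
  intro acc t ht
  rw [List.mem_range] at ht
  simp only [refStep, h t ht]

lemma refFold_some_lt (c : Nat → Int) (n : Nat) :
    ∀ t, (refFold c n).2 = some t → t < n := by
  unfold refFold
  suffices h : ∀ (l : List Nat) (r : Int × Option Nat),
      (∀ t, r.2 = some t → t < n) → (∀ t ∈ l, t < n) →
      ∀ t, (l.foldl (refStep c) r).2 = some t → t < n by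
    intro t
    exact h (List.range n) (0, none) (by simp) (by simp) t
  intro l
  induction l with
  | nil => intro r hr _ t ht; exact hr t ht
  | cons x xs ih =>
    intro r hr hl t ht
    refine ih _ ?_ (fun u hu => hl u (List.mem_cons_of_mem _ hu)) t ht
    intro u hu
    simp only [List.foldl_cons] at hu ⊢
    unfold refStep at hu
    split_ifs at hu with hc
    · simp at hu; subst hu; exact hl x List.mem_cons_self
    · exact hr u hu

lemma A_char (story question : List String) (k : Int) :
    get_best_context story question k
      = ((refFold (fun t => mc question (get_context_words story k ↑t)) story.length).2.map
          (fun t => get_context_words story k ↑t)).getD [] := by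
  unfold get_best_context refFold
  rw [PySem.List.pyRange_zero_natCast, List.foldl_map]
  rw [PySem.List.foldl_congr_mem _ _
      (fun (s : Int × Option (List String)) (t : Nat) =>
        if mc question (get_context_words story k ↑t) > s.1
        then (mc question (get_context_words story k ↑t), some (get_context_words story k ↑t))
        else s) (0, none) ?_]
  · have := simA (fun t => mc question (get_context_words story k ↑t))
      (fun t => get_context_words story k ↑t) (List.range story.length) 0 none
    simp only [Option.map_none] at this
    rw [this]
    cases (List.foldl (refStep fun t => mc question (get_context_words story k ↑t)) (0, none) (List.range story.length)).2 <;> simp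
  · intro acc t _
    simp only [PySem.List.foldl_ite_add_one, zero_add, mc]

lemma ctx_words_zero (story : List String) (t : Nat) :
    get_context_words story 0 ↑t = List.take t story ++ List.drop (t + 1) story := by
  unfold get_context_words
  rw [if_pos rfl]
  have h1 : PySem.List.slice story (some 0) (some ↑t) = List.take t story := by
    rw [show ((0:Int)) = ((0:Nat):Int) by norm_num, PySem.List.slice_natCast]
    simp
  have h2 : PySem.List.slice story (some (↑t + 1)) none = List.drop (t + 1) story := by
    rw [show ((t:Int) + 1) = (((t+1:Nat)):Int) by push_cast; ring, PySem.List.slice_from_natCast]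
  rw [h1, h2]

lemma ctx_words_pos (story : List String) {k : Int} (hk : 0 < k) {t : Nat} (ht : t < story.length) :
    get_context_words story k ↑t
      = seg story (t - k.toNat) (min (t + k.toNat) story.length) := by
  unfold get_context_words
  rw [if_neg (by omega)]
  have hstart : (if (↑t : Int) - k > 0 then ↑t - k else 0) = (((t - k.toNat : Nat)) : Int) := by
    split_ifs with h <;> omega
  have hend : (if (↑t : Int) + k < (story.length : Int) then ↑t + k else (story.length : Int))
      = (((min (t + k.toNat) story.length : Nat)) : Int) := by
    split_ifs with h <;> push_cast <;> omega
  rw [hstart, hend]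
  show PySem.List.slice story (some ↑(t - k.toNat)) (some ↑t) ++
      PySem.List.slice story (some ↑t) (some ↑(min (t + k.toNat) story.length)) =
      seg story (t - k.toNat) (min (t + k.toNat) story.length)
  rw [PySem.List.slice_natCast, PySem.List.slice_natCast]
  have h1 : List.take (t - (t - k.toNat)) (List.drop (t - k.toNat) story) = seg story (t - k.toNat) t := rfl
  have h2 : List.take (min (t + k.toNat) story.length - t) (List.drop t story)
      = seg story t (min (t + k.toNat) story.length) := rfl
  rw [h1, h2, seg_glue story (by omega) (by omega)]

lemma erase_count (story question : List String) {t : Nat} (ht : t < story.length) :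
    mc question (List.take t story ++ List.drop (t + 1) story)
      = (question.countP (fun q => decide (q ∈ story)) : Int)
        - (if story.count (story.getD t "") = 1 then (question.count (story.getD t "") : Int) else 0) := by
  set w := story.getD t "" with hw
  set l := List.take t story ++ List.drop (t + 1) story with hl
  have hperm : story.Perm (w :: l) := by
    conv_lhs => rw [← List.take_append_drop t story]
    rw [List.drop_eq_getElem_cons ht, hl, hw, List.getD_eq_getElem _ _ ht]
    exact List.perm_middle
  have hcount : story.count w = l.count w + 1 := by
    rw [hperm.count_eq, List.count_cons]
    simp
  have hmem : ∀ q, (q ∈ story) ↔ (q ∈ w :: l) := fun q => hperm.mem_iff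
  have hP : question.countP (fun q => decide (q ∈ story)) = question.countP (fun q => decide (q ∈ w :: l)) := by
    apply List.countP_congr
    intro q _
    simp [hmem q]
  rw [hP]
  have : (question.countP (fun q => decide (q ∈ w :: l)) : Int) = mc question (w :: l) := rfl
  rw [this, mc_cons]
  have hiff : story.count w = 1 ↔ ¬ (w ∈ l) := by
    rw [hcount]
    constructor
    · intro h; have : l.count w = 0 := by omega
      exact (List.count_eq_zero).1 this
    · intro h; have : l.count w = 0 := List.count_eq_zero.2 h
      omega
  by_cases hwl : w ∈ l
  · rw [if_pos hwl, if_neg (by rw [hiff]; simp [hwl])]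
    ring
  · rw [if_neg hwl, if_pos (hiff.2 hwl)]
    ring

theorem main_zero (story question : List String) :
    get_best_context story question 0 = get_best_context_alt story question 0 := by
  rw [A_char]
  simp only [get_best_context_alt, reduceIte]
  set n := story.length with hn
  set qcount := question.foldl (fun d q => d.insert q (d.getD q 0 + 1)) (PySem.Dict.empty : PySem.Dict String Int) with hqc
  set scount := story.foldl (fun d w => d.insert w (d.getD w 0 + 1)) (PySem.Dict.empty : PySem.Dict String Int) with hsc
  have hq : ∀ w, qcount.getD w 0 = (question.count w : Int) := by
    intro w; rw [hqc, counter_getD]; simp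
  have hs : ∀ w, scount.getD w 0 = (story.count w : Int) := by
    intro w; rw [hsc, counter_getD]; simp
  have hscont : ∀ w, scount.contains w = decide (w ∈ story) := by
    intro w; rw [hsc, counter_contains]; simp
  have hbase : question.foldl (fun b q => if scount.contains q then b + 1 else b) (0 : Int)
      = (question.countP (fun q => decide (q ∈ story)) : Int) := by
    rw [PySem.List.foldl_if_add_one, zero_add]
    congr 1
    apply List.countP_congr
    intro q _
    rw [hscont]
  set cntA := fun (t : Nat) => mc question (get_context_words story 0 (↑t : Int)) with hcntA
  rw [PySem.List.pyRange_zero_natCast, List.foldl_map]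
  rw [PySem.List.foldl_congr_mem _ _
      (fun (s : Int × Int × Bool) (t : Nat) =>
        if cntA t > s.1 then (cntA t, (↑t : Int), true) else s) (0, 0, false) ?_]
  · have hrel := simB0 cntA (fun t => (↑t : Int)) (List.range n) (0, 0, false) (0, none) ⟨rfl, rfl⟩
    unfold selRel at hrel
    set r := (List.range n).foldl (refStep cntA) (0, none) with hr
    have hRF : refFold cntA n = r := rfl
    rw [hRF]
    rcases hopt : r.2 with _ | t
    · rw [hopt] at hrel
      rcases hrel with ⟨-, hfd⟩
      simp only at hfd
      rw [hfd]
      simp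
    · rw [hopt] at hrel
      rcases hrel with ⟨-, hfd, hbi⟩
      simp only at hfd hbi
      rw [hfd, hbi]
      simp only [if_true, Option.map_some, Option.getD_some]
      have h1 : PySem.List.slice story none (some ↑t) = List.take t story := PySem.List.slice_to_natCast story t
      have h2 : PySem.List.slice story (some ((↑t : Int) + 1)) none = List.drop (t + 1) story := by
        rw [show ((t:Int) + 1) = (((t+1:Nat)):Int) by push_cast; ring, PySem.List.slice_from_natCast]
      rw [h1, h2]
      simp [ctx_words_zero]
  · intro acc t htm
    rw [List.mem_range] at htm
    simp only
    have hwt : PySem.List.pyGetD story (↑t) "" = story.getD t "" := PySem.List.pyGetD_natCast story t ""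
    rw [hwt, hbase, hq, hs]
    have hone : ((story.count (story.getD t "") : Int) = 1) ↔ (story.count (story.getD t "") = 1) := by
      constructor <;> intro h <;> omega
    have : (question.countP (fun q => decide (q ∈ story)) : Int)
        - (if (story.count (story.getD t "") : Int) = 1 then (question.count (story.getD t "") : Int) else 0)
        = cntA t := by
      rw [hcntA]
      simp only
      rw [ctx_words_zero, erase_count story question htm]
      split_ifs with h1 h2 <;> first | rfl | (exfalso; omega)
    rw [this]

-- ---- the B side, k > 0: named step functions (definitionally equal to the port's lambdas) ----
def qcD (question : List String) : PySem.Dict String Int :=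
  question.foldl (fun d q => d.insert q (d.getD q 0 + 1)) PySem.Dict.empty

def addStep (story : List String) (qc : PySem.Dict String Int)
    (p : PySem.Dict String Int × Int) (i : Int) : PySem.Dict String Int × Int :=
  let w := PySem.List.pyGetD story i ""
  let c := p.1.getD w 0
  (p.1.insert w (c + 1), if c = 0 then p.2 + qc.getD w 0 else p.2)

def remStep (story : List String) (qc : PySem.Dict String Int)
    (p : PySem.Dict String Int × Int) (i : Int) : PySem.Dict String Int × Int :=
  let w := PySem.List.pyGetD story i ""
  let c := p.1.getD w 0
  (p.1.insert w (c - 1), if c = 1 then p.2 - qc.getD w 0 else p.2)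

def bStep (story question : List String) (k : Int) (s : BState) (t : Int) : BState :=
  let n : Int := story.length
  let new_lo := max (t - k) 0
  let new_hi := min (t + k) n
  let s1 := (PySem.List.pyRange s.hi new_hi 1).foldl (addStep story (qcD question)) (s.wc, s.m)
  let s2 := (PySem.List.pyRange s.lo new_lo 1).foldl (remStep story (qcD question)) (s1.1, s1.2)
  let s' : BState := { wc := s2.1, m := s2.2, lo := new_lo, hi := new_hi,
                       best := s.best, best_lo := s.best_lo, best_hi := s.best_hi, found := s.found }
  if s'.m > s'.best then { s' with best := s'.m, best_lo := new_lo, best_hi := new_hi, found := true } else s'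

def bInit : BState :=
  { wc := PySem.Dict.empty, m := 0, lo := 0, hi := 0, best := 0, best_lo := 0, best_hi := 0, found := false }

lemma B_pos_char (story question : List String) {k : Int} (hk : k ≠ 0) :
    get_best_context_alt story question k =
      (if ((PySem.List.pyRange 0 (story.length : Int) 1).foldl (bStep story question k) bInit).found then
        PySem.List.slice story
          (some (((PySem.List.pyRange 0 (story.length : Int) 1).foldl (bStep story question k) bInit).best_lo))
          (some (((PySem.List.pyRange 0 (story.length : Int) 1).foldl (bStep story question k) bInit).best_hi))
       else []) := by
  simp only [get_best_context_alt, if_neg hk, bStep, addStep, remStep, qcD, bInit]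
  rfl

lemma qcD_getD (question : List String) (w : String) :
    (qcD question).getD w 0 = (question.count w : Int) := by
  rw [qcD, counter_getD]; simp

lemma addLoop (story question : List String) (lo a : Nat) (hlo : lo ≤ a)
    (wc : PySem.Dict String Int) (m : Int)
    (hwc : ∀ w, wc.getD w 0 = ((seg story lo a).count w : Int))
    (hm : m = mc question (seg story lo a)) :
    ∀ (b : Nat), a ≤ b → b ≤ story.length →
      (∀ w, ((PySem.List.pyRange ↑a ↑b 1).foldl (addStep story (qcD question)) (wc, m)).1.getD w 0
          = ((seg story lo b).count w : Int))
      ∧ ((PySem.List.pyRange ↑a ↑b 1).foldl (addStep story (qcD question)) (wc, m)).2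
          = mc question (seg story lo b) := by
  intro b hab
  induction b, hab using Nat.le_induction with
  | base =>
    intro _
    rw [PySem.List.pyRange_one_eq_nil (by omega)]
    exact ⟨hwc, hm⟩
  | succ b hab ih =>
    intro hbn
    obtain ⟨ihw, ihm⟩ := ih (by omega)
    have hsplit : PySem.List.pyRange ↑a (↑(b + 1)) 1 = PySem.List.pyRange ↑a ↑b 1 ++ [(↑b : Int)] := by
      rw [show ((↑(b + 1) : Int)) = (↑b : Int) + 1 by push_cast; ring]
      exact PySem.List.pyRange_one_succ_right (by exact_mod_cast hab)
    rw [hsplit, List.foldl_append, List.foldl_cons, List.foldl_nil]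
    set r := (PySem.List.pyRange ↑a ↑b 1).foldl (addStep story (qcD question)) (wc, m) with hr
    have hb : b < story.length := by omega
    have hwb : PySem.List.pyGetD story (↑b) "" = story.getD b "" := PySem.List.pyGetD_natCast story b ""
    have hseg : seg story lo (b + 1) = seg story lo b ++ [story.getD b ""] :=
      seg_succ story (by omega) hb
    have hc : r.1.getD (story.getD b "") 0 = ((seg story lo b).count (story.getD b "") : Int) :=
      ihw _
    constructor
    · intro w
      simp only [addStep, hwb]
      rw [PySem.Dict.getD_insert]
      rw [hseg]
      by_cases hwq : w = story.getD b ""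
      · rw [if_pos hwq, hc, hwq, List.count_append]
        simp
      · rw [if_neg hwq, ihw w, List.count_append]
        have h0 : List.count w [story.getD b ""] = 0 := by
          rw [List.count_eq_zero, List.mem_singleton]
          exact hwq
        rw [h0]
        simp
    · simp only [addStep, hwb]
      rw [hc, ihm, hseg, mc_append, qcD_getD]
      by_cases hmem : story.getD b "" ∈ seg story lo b
      · have : ((seg story lo b).count (story.getD b "") : Int) ≠ 0 := by
          have := List.count_pos_iff.2 hmem
          omega
        rw [if_neg this, if_pos hmem]
        ring
      · have : ((seg story lo b).count (story.getD b "") : Int) = 0 := by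
          rw [List.count_eq_zero.2 hmem]; rfl
        rw [if_pos this, if_neg hmem]

lemma remLoop (story question : List String) (a hi : Nat)
    (wc : PySem.Dict String Int) (m : Int)
    (hwc : ∀ w, wc.getD w 0 = ((seg story a hi).count w : Int))
    (hm : m = mc question (seg story a hi)) :
    ∀ (b : Nat), a ≤ b → b ≤ hi → hi ≤ story.length →
      (∀ w, ((PySem.List.pyRange ↑a ↑b 1).foldl (remStep story (qcD question)) (wc, m)).1.getD w 0
          = ((seg story b hi).count w : Int))
      ∧ ((PySem.List.pyRange ↑a ↑b 1).foldl (remStep story (qcD question)) (wc, m)).2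
          = mc question (seg story b hi) := by
  intro b hab
  induction b, hab using Nat.le_induction with
  | base =>
    intro _ _
    rw [PySem.List.pyRange_one_eq_nil (by omega)]
    exact ⟨hwc, hm⟩
  | succ b hab ih =>
    intro hbhi hhn
    obtain ⟨ihw, ihm⟩ := ih (by omega) hhn
    have hsplit : PySem.List.pyRange ↑a (↑(b + 1)) 1 = PySem.List.pyRange ↑a ↑b 1 ++ [(↑b : Int)] := by
      rw [show ((↑(b + 1) : Int)) = (↑b : Int) + 1 by push_cast; ring]
      exact PySem.List.pyRange_one_succ_right (by exact_mod_cast hab)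
    rw [hsplit, List.foldl_append, List.foldl_cons, List.foldl_nil]
    set r := (PySem.List.pyRange ↑a ↑b 1).foldl (remStep story (qcD question)) (wc, m) with hr
    have hb : b < story.length := by omega
    have hwb : PySem.List.pyGetD story (↑b) "" = story.getD b "" := PySem.List.pyGetD_natCast story b ""
    set x := story.getD b "" with hx
    have hseg : seg story b hi = x :: seg story (b + 1) hi := seg_cons story (by omega) hb
    have hc : r.1.getD x 0 = ((seg story b hi).count x : Int) := ihw _
    have hcx : (seg story b hi).count x = (seg story (b + 1) hi).count x + 1 := by
      rw [hseg, List.count_cons]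
      simp
    constructor
    · intro w
      simp only [remStep, hwb, ← hx]
      rw [PySem.Dict.getD_insert]
      by_cases hwq : w = x
      · rw [if_pos hwq, hc, hwq, hcx]
        push_cast
        ring
      · rw [if_neg hwq, ihw w, hseg, List.count_cons]
        have hxw : ¬ x = w := fun h => hwq h.symm
        simp [hxw]
    · simp only [remStep, hwb, ← hx]
      rw [hc, ihm, hseg, mc_cons, qcD_getD]
      by_cases hmem : x ∈ seg story (b + 1) hi
      · have hpos : (seg story (b + 1) hi).count x ≠ 0 := by
          have := List.count_pos_iff.2 hmem
          omega
        rw [if_neg (by rw [List.count_cons_self]; push_cast; omega), if_pos hmem]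
        ring
      · have hz : (seg story (b + 1) hi).count x = 0 := List.count_eq_zero.2 hmem
        rw [if_pos (by rw [List.count_cons_self, hz]; norm_num), if_neg hmem]
        ring

def pLo (k' j : Nat) : Nat := match j with | 0 => 0 | Nat.succ t => t - k'
def pHi (n k' j : Nat) : Nat := match j with | 0 => 0 | Nat.succ t => min (t + k') n

def cntB (story question : List String) (k' : Nat) (t : Nat) : Int :=
  mc question (seg story (t - k') (min (t + k') story.length))

lemma B_inv (story question : List String) (k : Int) (hk : 0 < k) :
    ∀ (j : Nat), j ≤ story.length →
      (((List.range j).foldl (fun (s : BState) (t : Nat) => bStep story question k s ↑t) bInit).lo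
          = ((pLo k.toNat j : Nat) : Int))
      ∧ (((List.range j).foldl (fun (s : BState) (t : Nat) => bStep story question k s ↑t) bInit).hi
          = ((pHi story.length k.toNat j : Nat) : Int))
      ∧ pLo k.toNat j ≤ pHi story.length k.toNat j
      ∧ pHi story.length k.toNat j ≤ story.length
      ∧ (∀ w, ((List.range j).foldl (fun (s : BState) (t : Nat) => bStep story question k s ↑t) bInit).wc.getD w 0
          = ((seg story (pLo k.toNat j) (pHi story.length k.toNat j)).count w : Int))
      ∧ (((List.range j).foldl (fun (s : BState) (t : Nat) => bStep story question k s ↑t) bInit).m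
          = mc question (seg story (pLo k.toNat j) (pHi story.length k.toNat j)))
      ∧ (((List.range j).foldl (fun (s : BState) (t : Nat) => bStep story question k s ↑t) bInit).best
          = (refFold (cntB story question k.toNat) j).1)
      ∧ (match (refFold (cntB story question k.toNat) j).2 with
         | none => ((List.range j).foldl (fun (s : BState) (t : Nat) => bStep story question k s ↑t) bInit).found = false
         | some t => ((List.range j).foldl (fun (s : BState) (t : Nat) => bStep story question k s ↑t) bInit).found = true
             ∧ ((List.range j).foldl (fun (s : BState) (t : Nat) => bStep story question k s ↑t) bInit).best_lo
                 = ((t - k.toNat : Nat) : Int)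
             ∧ ((List.range j).foldl (fun (s : BState) (t : Nat) => bStep story question k s ↑t) bInit).best_hi
                 = ((min (t + k.toNat) story.length : Nat) : Int)) := by
  intro j
  induction j with
  | zero =>
    intro _
    refine ⟨rfl, rfl, le_refl 0, by simp [pHi], ?_, by simp [mc, seg, pLo, pHi, bInit], rfl, rfl⟩
    intro w
    simp [bInit, seg, pLo, pHi]
  | succ j ih =>
    intro hjn
    obtain ⟨hlo, hhi, hlh, hhn, hwc, hm, hbest, hmatch⟩ := ih (by omega)
    set n := story.length with hn
    set k' := k.toNat with hk'
    set s := (List.range j).foldl (fun (s : BState) (t : Nat) => bStep story question k s ↑t) bInit with hs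
    rw [List.range_succ, List.foldl_append, List.foldl_cons, List.foldl_nil]
    have hnlo : max ((j : Int) - k) 0 = ((j - k' : Nat) : Int) := by omega
    have hnhi : min ((j : Int) + k) (story.length : Int) = ((min (j + k') n : Nat) : Int) := by
      rw [hn]; omega
    have hmono_hi : pHi n k' j ≤ min (j + k') n := by
      cases j <;> simp [pHi] <;> omega
    have hmono_lo : pLo k' j ≤ j - k' := by
      cases j <;> simp [pLo] <;> omega
    have hjlt : j < n := by omega
    obtain ⟨h1w, h1m⟩ := addLoop story question (pLo k' j) (pHi n k' j) hlh s.wc s.m hwc hm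
      (min (j + k') n) hmono_hi (by omega)
    obtain ⟨h2w, h2m⟩ := remLoop story question (pLo k' j) (min (j + k') n) _ _ h1w h1m
      (j - k') (by omega) (by omega) (by omega)
    set S2 := (PySem.List.pyRange (↑(pLo k' j) : Int) ↑(j - k') 1).foldl (remStep story (qcD question))
        ((PySem.List.pyRange (↑(pHi n k' j) : Int) ↑(min (j + k') n) 1).foldl
          (addStep story (qcD question)) (s.wc, s.m)) with hS2
    have hstep : bStep story question k s ↑j =
        (if S2.2 > s.best then
          { wc := S2.1, m := S2.2, lo := ((j - k' : Nat) : Int), hi := ((min (j + k') n : Nat) : Int),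
            best := S2.2, best_lo := ((j - k' : Nat) : Int), best_hi := ((min (j + k') n : Nat) : Int),
            found := true }
         else
          { wc := S2.1, m := S2.2, lo := ((j - k' : Nat) : Int), hi := ((min (j + k') n : Nat) : Int),
            best := s.best, best_lo := s.best_lo, best_hi := s.best_hi, found := s.found }) := by
      rw [bStep, hS2]
      simp only [hnlo, hnhi, hlo, hhi]
    rw [hstep]
    have hRsucc : refFold (cntB story question k') (j + 1)
        = refStep (cntB story question k') (refFold (cntB story question k') j) j := by
      unfold refFold
      rw [List.range_succ, List.foldl_append, List.foldl_cons, List.foldl_nil]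
    have hcnt : S2.2 = cntB story question k' j := by
      rw [h2m]; rfl
    rw [hRsucc]
    unfold refStep
    by_cases hgt : cntB story question k' j > (refFold (cntB story question k') j).1
    · rw [if_pos (by rw [hcnt, hbest]; exact hgt), if_pos hgt]
      refine ⟨rfl, rfl, by simp only [pLo, pHi]; omega, by simp only [pHi]; omega,
        h2w, ?_, ?_, rfl, rfl, rfl⟩
      · rw [show (pLo k' (j+1)) = j - k' from rfl, show (pHi n k' (j+1)) = min (j + k') n from rfl]
        exact h2m
      · rw [hcnt]
    · rw [if_neg (by rw [hcnt, hbest]; exact hgt), if_neg hgt]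
      refine ⟨rfl, rfl, by simp only [pLo, pHi]; omega, by simp only [pHi]; omega,
        h2w, ?_, hbest, ?_⟩
      · rw [show (pLo k' (j+1)) = j - k' from rfl, show (pHi n k' (j+1)) = min (j + k') n from rfl]
        exact h2m
      · rcases hR : (refFold (cntB story question k') j).2 with _ | t
        · rw [hR] at hmatch
          exact hmatch
        · rw [hR] at hmatch
          exact hmatch

theorem main_pos (story question : List String) {k : Int} (hk : 0 < k) :
    get_best_context story question k = get_best_context_alt story question k := by
  rw [A_char, B_pos_char story question (by omega : k ≠ 0)]
  set n := story.length with hn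
  rw [PySem.List.pyRange_zero_natCast, List.foldl_map]
  obtain ⟨-, -, -, -, -, -, hbest, hmatch⟩ := B_inv story question k hk n (le_refl n)
  have hcc : refFold (fun t => mc question (get_context_words story k ↑t)) n
      = refFold (cntB story question k.toNat) n := by
    apply refFold_congr
    intro t ht
    rw [ctx_words_pos story hk ht]
    rfl
  rw [hcc]
  rcases hR : (refFold (cntB story question k.toNat) n).2 with _ | t
  · rw [hR] at hmatch
    simp only at hmatch
    rw [hmatch]
    simp
  · rw [hR] at hmatch
    obtain ⟨hf, hbl, hbh⟩ := hmatch
    rw [hf, hbl, hbh]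
    rw [PySem.List.slice_natCast]
    show get_context_words story k (↑t : Int)
        = List.take (min (t + k.toNat) story.length - (t - k.toNat)) (List.drop (t - k.toNat) story)
    exact ctx_words_pos story hk (refFold_some_lt _ n t hR)

-- ===== VERDICT (by name: the statement is the Claim_ definition above) =====
theorem get_best_context_spec : Claim_equal_get_best_context := by
  intro story question k _ hpre
  unfold Spec_get_best_context
  rcases hpre with ⟨hk, -, -⟩
  rcases lt_or_eq_of_le hk with hk' | hk'
  · exact main_pos story question hk'
  · subst hk'; exact main_zero story question
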